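-- pv_equiv track=rewrite | github.com/sh1doy/AntBook | sec2_4/Expedition.py | expedition
-- ===== SOURCE A (Python) =====
-- import queue
--
-- def expedition(N,L,P,A,B):
-- 	now = P
-- 	q=queue.PriorityQueue()
-- 	count = 0
-- 	a_end = 0
-- 	while(now < L):
-- 		while(a_end<len(A) and A[a_end]<=now):
-- 			# 降順にできないから負にしてる
-- 			q.put(-B[a_end])
-- 			a_end+=1
-- 		try:
-- 			now+= -q.get_nowait()
-- 		except:
-- 			return(-1) #ガス欠
-- 		count+=1
-- 	return(count)
-- ===== SOURCE B (Python) =====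
-- def _insert_desc(tank, x):
--     # insert x into tank kept sorted in descending order
--     k = 0
--     while k < len(tank) and tank[k] >= x:
--         k += 1
--     tank.insert(k, x)
--
--
-- def expedition(N, L, P, A, B):
--     # per-station greedy: walk the stations once in order; before passing each
--     # station (capped at L) refuel from the best fuels collected so far
--     now = P
--     count = 0
--     tank = []  # fuel amounts of passed stations, sorted descending
--     for a, b in zip(A, B):
--         if now >= L:
--             break
--         target = min(a, L)
--         while now < target:
--             if not tank:
--                 return -1
--             now += tank.pop(0)
--             count += 1
--         _insert_desc(tank, b)
--     while now < L:
--         if not tank: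
--             return -1
--         now += tank.pop(0)
--         count += 1
--     return count
-- ===== Notes on version B (the rewrite author's own statement) =====
-- stated objective: alternative
-- what changed: Replaces A's single refuel-driven while loop over a PriorityQueue of negated values by a single ordered walk over the stations (plus the goal L), refuelling just enough before each waypoint from a descending-sorted list maintained by insertion and popped at the front.
-- outside the precondition, e.g. on expedition(1, 5, 0, [3], []): A returns -1, B returns -1
import Mathlib
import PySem

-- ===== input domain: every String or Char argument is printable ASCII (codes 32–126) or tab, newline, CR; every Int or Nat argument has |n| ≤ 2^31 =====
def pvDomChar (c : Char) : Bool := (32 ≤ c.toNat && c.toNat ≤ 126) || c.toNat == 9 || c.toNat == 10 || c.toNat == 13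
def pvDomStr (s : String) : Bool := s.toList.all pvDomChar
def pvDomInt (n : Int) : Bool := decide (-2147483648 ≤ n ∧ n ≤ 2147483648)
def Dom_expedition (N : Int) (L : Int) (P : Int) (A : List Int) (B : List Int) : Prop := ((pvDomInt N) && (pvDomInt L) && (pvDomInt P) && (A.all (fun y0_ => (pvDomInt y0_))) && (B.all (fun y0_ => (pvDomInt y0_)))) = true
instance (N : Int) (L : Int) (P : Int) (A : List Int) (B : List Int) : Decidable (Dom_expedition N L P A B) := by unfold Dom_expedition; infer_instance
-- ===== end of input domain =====

-- B replaces A's refuel-driven while loop over a PriorityQueue of negated fuel values by a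
-- single ordered walk over the stations (plus the goal L), refuelling just enough before each
-- waypoint from a descending-sorted list maintained by insertion: an alternative decomposition.

-- ===== PORT A =====
-- inner while: push -B[a_end] for every station already reached (getD is exact under Pre_)
def expA_push (A B : List Int) (now : Int) : Nat → Nat → List Int → List Int × Nat
  | 0, a_end, q => (q, a_end)
  | fuel + 1, a_end, q =>
    if a_end < A.length ∧ A.getD a_end 0 ≤ now then
      expA_push A B now fuel (a_end + 1) (q ++ [-(B.getD a_end 0)])
    else (q, a_end)

-- outer while; fuel (= len A + 1) is only a totality guard: each iteration pops one queue element
def expA_loop (L : Int) (A B : List Int) : Nat → Int → Int → Nat → List Int → Int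
  | fuel, now, count, a_end, q =>
    if now < L then
      match fuel with
      | 0 => -1
      | fuel' + 1 =>
        let p := expA_push A B now A.length a_end q
        match p.1 with
        | [] => -1                           -- get_nowait raised: ガス欠
        | x :: xs =>
          let m := xs.foldl min x            -- PriorityQueue.get_nowait: minimum stored (negated) value
          expA_loop L A B fuel' (now + (-m)) (count + 1) p.2 ((x :: xs).erase m)
    else count

def expedition (N : Int) (L : Int) (P : Int) (A : List Int) (B : List Int) : Int :=
  expA_loop L A B (A.length + 1) P 0 0 []

-- ===== PORT B =====
-- _insert_desc: insert x into the descending-sorted tank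
def insDesc : List Int → Int → List Int
  | [], x => [x]
  | a :: t, x => if a ≥ x then a :: insDesc t x else x :: a :: t

-- 'while now < target: pop front (the max)'; none = the 'return -1' inside the while
def expB_pop (target : Int) : Int → Int → List Int → Option (Int × Int × List Int)
  | now, count, [] => if now < target then none else some (now, count, [])
  | now, count, b :: rest =>
    if now < target then expB_pop target (now + b) (count + 1) rest
    else some (now, count, b :: rest)

-- 'for a, b in zip(A, B): …' followed by the final 'while now < L' loop
def expB_main (L : Int) : List (Int × Int) → Int → Int → List Int → Int
  | [], now, count, tank =>
    if L ≤ now then count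
    else
      match expB_pop L now count tank with
      | none => -1
      | some (_, c, _) => c
  | (a, b) :: rest, now, count, tank =>
    if L ≤ now then count
    else
      match expB_pop (min a L) now count tank with
      | none => -1
      | some (now', c', tank') => expB_main L rest now' c' (insDesc tank' b)

def expedition_alt (N : Int) (L : Int) (P : Int) (A : List Int) (B : List Int) : Int :=
  expB_main L (A.zip B) P 0 []

-- ===== PRECONDITION & SPEC =====
-- Pre_ excludes inputs with len(B) < len(A) that still need refuelling (P < L): there Python A
-- can raise IndexError on B[a_end]; some such inputs still return (e.g. -1 when no station is
-- reachable) and are excluded with them — see claim.json cites.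
def Pre_expedition (N : Int) (L : Int) (P : Int) (A : List Int) (B : List Int) : Prop :=
  A.length ≤ B.length ∨ L ≤ P
instance (N : Int) (L : Int) (P : Int) (A : List Int) (B : List Int) : Decidable (Pre_expedition N L P A B) := by unfold Pre_expedition; infer_instance

def pvWitness_expedition : Int × Int × Int × List Int × List Int := (3, 10, 2, [1, 4, 7], [3, 4, 5])

def Spec_expedition (N : Int) (L : Int) (P : Int) (A : List Int) (B : List Int) (out : Int) : Prop := out = expedition_alt N L P A B
instance (N : Int) (L : Int) (P : Int) (A : List Int) (B : List Int) (out : Int) : Decidable (Spec_expedition N L P A B out) := by unfold Spec_expedition; infer_instance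

-- ===== CLAIM (what is proved, stated in full; the proofs are below) =====
def Claim_equal_expedition : Prop := ∀ (N : Int) (L : Int) (P : Int) (A : List Int) (B : List Int), Dom_expedition N L P A B → Pre_expedition N L P A B → Spec_expedition N L P A B (expedition N L P A B)

-- ===== LEMMAS AND PROOFS =====

lemma insDesc_perm : ∀ (t : List Int) (x : Int), (insDesc t x).Perm (x :: t) := by
  intro t
  induction t with
  | nil => intro x; simp [insDesc]
  | cons a t ih =>
    intro x
    rw [insDesc]
    by_cases h : a ≥ x
    · rw [if_pos h]
      exact ((ih x).cons a).trans (List.Perm.swap x a t)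
    · rw [if_neg h]

lemma insDesc_sorted : ∀ (t : List Int) (x : Int),
    t.Pairwise (· ≥ ·) → (insDesc t x).Pairwise (· ≥ ·) := by
  intro t
  induction t with
  | nil => intro x _; simp [insDesc]
  | cons a t ih =>
    intro x h
    rw [List.pairwise_cons] at h
    rw [insDesc]
    by_cases hax : a ≥ x
    · rw [if_pos hax, List.pairwise_cons]
      refine ⟨?_, ih x h.2⟩
      intro y hy
      rcases List.mem_cons.mp ((insDesc_perm t x).mem_iff.mp hy) with rfl | hy'
      · exact hax
      · exact h.1 y hy'
    · rw [if_neg hax, List.pairwise_cons]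
      constructor
      · intro y hy
        rcases List.mem_cons.mp hy with rfl | hy'
        · omega
        · have := h.1 y hy'; omega
      · exact List.pairwise_cons.mpr h

lemma foldl_min_le_init : ∀ (xs : List Int) (x : Int), xs.foldl min x ≤ x := by
  intro xs
  induction xs with
  | nil => intro x; simp
  | cons a t ih =>
    intro x
    calc (a :: t).foldl min x = t.foldl min (min x a) := rfl
    _ ≤ min x a := ih _
    _ ≤ x := min_le_left _ _

lemma foldl_min_le_mem : ∀ (xs : List Int) (x y : Int), y ∈ xs → xs.foldl min x ≤ y := by
  intro xs
  induction xs with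
  | nil => intro x y h; simp at h
  | cons a t ih =>
    intro x y h
    rcases List.mem_cons.mp h with rfl | h'
    · calc (y :: t).foldl min x = t.foldl min (min x y) := rfl
      _ ≤ min x y := foldl_min_le_init _ _
      _ ≤ y := min_le_right _ _
    · exact ih _ y h'

lemma foldl_min_mem : ∀ (xs : List Int) (x : Int), xs.foldl min x = x ∨ xs.foldl min x ∈ xs := by
  intro xs
  induction xs with
  | nil => intro x; left; rfl
  | cons a t ih =>
    intro x
    rcases ih (min x a) with h | h
    · by_cases hxa : x ≤ a
      · left; simpa [List.foldl_cons, min_eq_left hxa] using h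
      · right
        have hma : min x a = a := min_eq_right (by omega)
        rw [hma] at h
        rw [List.foldl_cons, hma, h]
        exact List.mem_cons_self
    · right; right; exact h

-- the popped minimum of q is minus the head of the descending-sorted tank
lemma min_of_perm_desc (x : Int) (xs : List Int) (t0 : Int) (rest : List Int)
    (hperm : (x :: xs).Perm ((t0 :: rest).map (fun y => -y)))
    (hsort : (t0 :: rest).Pairwise (· ≥ ·)) :
    xs.foldl min x = -t0 := by
  set m := xs.foldl min x with hm
  have hmem : m ∈ x :: xs := by
    rcases foldl_min_mem xs x with h | h
    · rw [hm, h]; exact List.mem_cons_self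
    · exact List.mem_cons_of_mem _ h
  have hle : ∀ y ∈ x :: xs, m ≤ y := by
    intro y hy
    rcases List.mem_cons.mp hy with rfl | hy'
    · exact foldl_min_le_init xs y
    · exact foldl_min_le_mem xs x y hy'
  have hmem' : m ∈ (t0 :: rest).map (fun y => -y) := hperm.mem_iff.mp hmem
  obtain ⟨t, ht, hmt⟩ := List.mem_map.mp hmem'
  have ht0 : t ≤ t0 := by
    rcases List.mem_cons.mp ht with rfl | ht'
    · exact le_refl t
    · exact (List.pairwise_cons.mp hsort).1 t ht'
  have hneg : (-t0 : Int) ∈ x :: xs := hperm.mem_iff.mpr (List.mem_map.mpr ⟨t0, List.mem_cons_self, rfl⟩)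
  have h1 : m ≤ -t0 := hle _ hneg
  omega

lemma expB_main_ge (L now count : Int) (st : List (Int × Int)) (tank : List Int) (h : L ≤ now) :
    expB_main L st now count tank = count := by
  cases st with
  | nil => rw [expB_main, if_pos h]
  | cons p rest => obtain ⟨a, b⟩ := p; rw [expB_main, if_pos h]

lemma expB_pop_noop (target now count : Int) (tank : List Int) (h : ¬ now < target) :
    expB_pop target now count tank = some (now, count, tank) := by
  cases tank <;> simp [expB_pop, h]

-- popping once from the sorted tank commutes with restarting expB_main (empty-stations case)
lemma expB_main_pop_nil (L now count t0 : Int) (rest : List Int) (hL : now < L) :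
    expB_main L [] now count (t0 :: rest) = expB_main L [] (now + t0) (count + 1) rest := by
  rw [expB_main, expB_main, if_neg (by omega)]
  by_cases h2 : L ≤ now + t0
  · rw [if_pos h2]
    rw [show expB_pop L now count (t0 :: rest) = expB_pop L (now + t0) (count + 1) rest from by
      rw [expB_pop, if_pos hL]]
    rw [expB_pop_noop _ _ _ _ (by omega)]
  · rw [if_neg h2]
    rw [show expB_pop L now count (t0 :: rest) = expB_pop L (now + t0) (count + 1) rest from by
      rw [expB_pop, if_pos hL]]

-- popping once commutes with restarting expB_main (blocked-station case)
lemma expB_main_pop_cons (L now count t0 a b : Int) (rest : List Int) (rest' : List (Int × Int))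
    (hblock : now < min a L) :
    expB_main L ((a, b) :: rest') now count (t0 :: rest) =
      expB_main L ((a, b) :: rest') (now + t0) (count + 1) rest := by
  have hL : now < L := lt_of_lt_of_le hblock (min_le_right _ _)
  rw [expB_main, expB_main, if_neg (by omega)]
  have hstep : expB_pop (min a L) now count (t0 :: rest) = expB_pop (min a L) (now + t0) (count + 1) rest := by
    rw [expB_pop, if_pos hblock]
  by_cases h2 : L ≤ now + t0
  · rw [if_pos h2, hstep, expB_pop_noop _ _ _ _ (by omega)]
    exact expB_main_ge L _ _ rest' _ h2
  · rw [if_neg h2, hstep]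

-- push phase: A unlocks a prefix of stations; B walks the same stations without popping
lemma push_align (L now count : Int) (A B : List Int) (hAB : A.length ≤ B.length) (hL : now < L) :
    ∀ (fuelP a_end : Nat) (q tank : List Int),
      a_end ≤ A.length →
      A.length - a_end ≤ fuelP →
      q.Perm (tank.map (fun y => -y)) →
      tank.Pairwise (· ≥ ·) →
      ∃ tank',
        expB_main L ((A.zip B).drop a_end) now count tank =
          expB_main L ((A.zip B).drop (expA_push A B now fuelP a_end q).2) now count tank' ∧
        (expA_push A B now fuelP a_end q).1.Perm (tank'.map (fun y => -y)) ∧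
        tank'.Pairwise (· ≥ ·) ∧
        (expA_push A B now fuelP a_end q).2 ≤ A.length ∧
        (expA_push A B now fuelP a_end q).1.length + (A.length - (expA_push A B now fuelP a_end q).2)
          = q.length + (A.length - a_end) ∧
        ((expA_push A B now fuelP a_end q).2 = A.length ∨
          now < A.getD (expA_push A B now fuelP a_end q).2 0) := by
  intro fuelP
  induction fuelP with
  | zero =>
    intro a_end q tank hle hfuel hperm hsort
    have hp2 : (expA_push A B now 0 a_end q).2 = a_end := rfl
    exact ⟨tank, rfl, hperm, hsort, by rw [hp2]; exact hle, rfl, Or.inl (by rw [hp2]; omega)⟩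
  | succ f ih =>
    intro a_end q tank hle hfuel hperm hsort
    rw [expA_push]
    by_cases hc : a_end < A.length ∧ A.getD a_end 0 ≤ now
    · rw [if_pos hc]
      have hzlen : (A.zip B).length = A.length := by
        rw [List.length_zip]; omega
      have hbz : (A.zip B).drop a_end
          = (A.getD a_end 0, B.getD a_end 0) :: (A.zip B).drop (a_end + 1) := by
        have hlt : a_end < (A.zip B).length := by omega
        rw [List.drop_eq_getElem_cons hlt]
        congr 1
        rw [List.getElem_zip]
        have h1 : A.getD a_end 0 = A[a_end] := List.getD_eq_getElem A 0 (by omega)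
        have h2 : B.getD a_end 0 = B[a_end] := List.getD_eq_getElem B 0 (by omega)
        rw [h1, h2]
      have hperm' : (q ++ [-(B.getD a_end 0)]).Perm
          ((insDesc tank (B.getD a_end 0)).map (fun y => -y)) := by
        refine (List.perm_append_singleton _ _).trans ?_
        refine (hperm.cons _).trans ?_
        have := ((insDesc_perm tank (B.getD a_end 0)).map (fun y => -y)).symm
        simpa using this
      obtain ⟨tank', h1, h2, h3, h4, h5, h6⟩ :=
        ih (a_end + 1) (q ++ [-(B.getD a_end 0)]) (insDesc tank (B.getD a_end 0))
          (by omega) (by omega) hperm' (insDesc_sorted tank _ hsort)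
      refine ⟨tank', ?_, h2, h3, h4, ?_, h6⟩
      · rw [hbz, expB_main, if_neg (by omega),
          expB_pop_noop _ _ _ _ (by have := min_le_left (A.getD a_end 0) L; omega)]
        exact h1
      · simp only [List.length_append, List.length_cons, List.length_nil] at h5
        omega
    · rw [if_neg hc]
      refine ⟨tank, rfl, hperm, hsort, hle, rfl, ?_⟩
      show a_end = A.length ∨ now < A.getD a_end 0
      by_cases h1 : a_end < A.length
      · right; by_contra hnot; exact hc ⟨h1, by omega⟩
      · left; omega

-- main simulation: A's heap loop equals B's station walk from aligned states
lemma main_sim (L : Int) (A B : List Int) (hAB : A.length ≤ B.length) :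
    ∀ (fuel : Nat) (now count : Int) (a_end : Nat) (q tank : List Int),
      a_end ≤ A.length →
      q.length + (A.length - a_end) < fuel →
      q.Perm (tank.map (fun y => -y)) →
      tank.Pairwise (· ≥ ·) →
      expA_loop L A B fuel now count a_end q =
        expB_main L ((A.zip B).drop a_end) now count tank := by
  intro fuel
  induction fuel with
  | zero => intro now count a_end q tank h1 h2 hperm hsort; omega
  | succ f ih =>
    intro now count a_end q tank h1 h2 hperm hsort
    rw [expA_loop]
    by_cases hL : now < L
    · rw [if_pos hL]
      obtain ⟨tank', hB, hperm', hsort', hle', hlen', hblock⟩ :=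
        push_align L now count A B hAB hL A.length a_end q tank h1 (by omega) hperm hsort
      rw [hB]
      have hzlen : (A.zip B).length = A.length := by rw [List.length_zip]; omega
      rcases hq : (expA_push A B now A.length a_end q).1 with _ | ⟨x, xs⟩
      · -- queue empty: both return -1
        simp only [hq]
        rw [hq] at hperm'
        have htank' : tank' = [] :=
          List.map_eq_nil_iff.mp (hperm'.symm.eq_nil)
        subst htank'
        by_cases hplen : (expA_push A B now A.length a_end q).2 = A.length
        · rw [hplen, List.drop_of_length_le (by omega), expB_main, if_neg (by omega),
            expB_pop, if_pos hL]
        · have hplt : (expA_push A B now A.length a_end q).2 < A.length := by omega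
          have hnow : now < A.getD (expA_push A B now A.length a_end q).2 0 := by
            rcases hblock with h | h
            · omega
            · exact h
          rw [List.drop_eq_getElem_cons (l := A.zip B) (by omega), expB_main]
          rw [List.getElem_zip]
          rw [if_neg (by omega), expB_pop,
            if_pos (by
              have hg : A.getD (expA_push A B now A.length a_end q).2 0
                  = A[(expA_push A B now A.length a_end q).2] :=
                List.getD_eq_getElem A 0 (by omega)
              have := lt_min (hg ▸ hnow) hL
              omega)]
      · -- pop the maximum
        simp only [hq]
        rw [hq] at hperm' hlen'
        rcases tank' with _ | ⟨t0, rest⟩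
        · exact absurd hperm'.eq_nil (by simp)
        · have hmin : xs.foldl min x = -t0 :=
            min_of_perm_desc x xs t0 rest hperm' hsort'
          have hmemneg : (-t0 : Int) ∈ x :: xs :=
            hperm'.mem_iff.mpr (List.mem_map.mpr ⟨t0, List.mem_cons_self, rfl⟩)
          have hstep : expB_main L ((A.zip B).drop (expA_push A B now A.length a_end q).2)
              now count (t0 :: rest)
              = expB_main L ((A.zip B).drop (expA_push A B now A.length a_end q).2)
                (now + t0) (count + 1) rest := by
            rcases hdrop : (A.zip B).drop (expA_push A B now A.length a_end q).2
              with _ | ⟨⟨a, b⟩, rest''⟩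
            · exact expB_main_pop_nil L now count t0 rest hL
            · have hplt : (expA_push A B now A.length a_end q).2 < A.length := by
                by_contra hge
                rw [List.drop_of_length_le (by omega)] at hdrop
                simp at hdrop
              have hget : (A.zip B).drop (expA_push A B now A.length a_end q).2
                  = (A.zip B)[(expA_push A B now A.length a_end q).2] ::
                    (A.zip B).drop ((expA_push A B now A.length a_end q).2 + 1) :=
                List.drop_eq_getElem_cons (by omega)
              rw [hget] at hdrop
              have ha : a = A[(expA_push A B now A.length a_end q).2] := by
                have := (List.cons.injEq _ _ _ _).mp hdrop |>.1
                rw [List.getElem_zip] at this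
                exact ((Prod.mk.injEq _ _ _ _).mp this).1.symm
              have hnow : now < a := by
                rcases hblock with h | h
                · omega
                · have hg : A.getD (expA_push A B now A.length a_end q).2 0
                      = A[(expA_push A B now A.length a_end q).2] :=
                    List.getD_eq_getElem A 0 (by omega)
                  rw [hg] at h
                  omega
              exact expB_main_pop_cons L now count t0 a b rest rest'' (lt_min hnow hL)
          rw [hstep, hmin]
          have herase : ((x :: xs).erase (-t0)).Perm (rest.map (fun y => -y)) := by
            have h1 := hperm'.erase (-t0)
            simpa [List.erase_cons_head] using h1
          have hlenq : ((x :: xs).erase (-t0)).length = xs.length := by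
            rw [List.length_erase_of_mem hmemneg]
            simp
          have := ih (now + -(-t0)) (count + 1) (expA_push A B now A.length a_end q).2
            ((x :: xs).erase (-t0)) rest hle'
            (by
              rw [hlenq]
              simp only [List.length_cons] at hlen'
              omega)
            herase ((List.pairwise_cons.mp hsort').2)
          simpa using this
    · rw [if_neg hL]
      exact (expB_main_ge _ _ _ _ _ (by omega)).symm

-- ===== VERDICT (by name: the statement is the Claim_ definition above) =====
theorem expedition_spec : Claim_equal_expedition := by
  intro N L P A B _ hpre
  unfold Spec_expedition expedition expedition_alt
  rcases hpre with hAB | hLP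
  · simpa using main_sim L A B hAB (A.length + 1) P 0 0 [] [] (by omega) (by simp) (List.Perm.refl _) (by simp)
  · rw [expA_loop, if_neg (by omega)]
    exact (expB_main_ge _ _ _ _ _ hLP).symm
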